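-- pv_equiv track=rewrite | github.com/RaidenEi11/KeySmith | pwpsch.py | password_poolsize
-- ===== SOURCE A (Python) =====
-- def password_poolsize(password):
--     lowercase = any(c.islower() for c in password)
--     uppercase = any(c.isupper() for c in password)
--     digits = any(c.isdigit() for c in password)
--     special_chars = any(not c.isalnum() for c in password)
--     whitespace = ' ' in password
--     pool_size = 0
--     if lowercase:
--         pool_size += 26
--     if uppercase:
--         pool_size += 26
--     if digits:
--         pool_size += 10
--     if special_chars:
--         # Assuming special characters include punctuation, space, etc.
--         pool_size += 32  # Adjust this number based on your specific requirements
--     if whitespace: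
--         pool_size += 1
--     return pool_size
-- ===== SOURCE B (Python) =====
-- _POOL = {1: 26, 2: 26, 4: 10, 8: 32, 16: 1}
--
--
-- def _charmask(c):
--     m = 0
--     if c.islower():
--         m |= 1
--     if c.isupper():
--         m |= 2
--     if c.isdigit():
--         m |= 4
--     if not c.isalnum():
--         m |= 8
--     if c == ' ':
--         m |= 16
--     return m
--
--
-- def password_poolsize(password):
--     mask = 0
--     for c in set(password):
--         mask |= _charmask(c)
--     return sum(w for bit, w in _POOL.items() if mask & bit)
-- ===== Notes on version B (the rewrite author's own statement) =====
-- stated objective: faster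
-- what changed: Instead of five separate scans of the password adding hard-coded constants under if-statements, B maps each distinct character (set(password)) to a class bitmask, OR-folds the masks into one integer, and computes the result table-driven as the sum of weights of the bits set, via a bit->weight dict.
import Mathlib
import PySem

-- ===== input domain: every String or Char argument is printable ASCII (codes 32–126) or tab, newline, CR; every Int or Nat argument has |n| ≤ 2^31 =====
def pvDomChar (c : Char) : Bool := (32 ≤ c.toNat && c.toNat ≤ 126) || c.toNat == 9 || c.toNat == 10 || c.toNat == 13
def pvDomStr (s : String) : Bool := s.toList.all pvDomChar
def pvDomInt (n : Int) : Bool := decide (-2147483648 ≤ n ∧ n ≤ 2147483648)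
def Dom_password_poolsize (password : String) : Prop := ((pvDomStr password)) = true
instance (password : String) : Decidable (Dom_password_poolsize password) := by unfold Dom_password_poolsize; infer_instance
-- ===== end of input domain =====

-- B replaces A's five scans + hard-coded if/add chain by a per-character class bitmask,
-- OR-folded over the distinct characters, decoded through a bit->weight table; measured faster (dedup).

-- ===== PORT A =====
def password_poolsize (password : String) : Int :=
  let lowercase := password.toList.any (fun c => PySem.Chars.islower c)
  let uppercase := password.toList.any (fun c => PySem.Chars.isupper c)
  let digits := password.toList.any (fun c => PySem.Chars.isdigit c)
  let special_chars := password.toList.any (fun c => !PySem.Chars.isalnum c)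
  let whitespace := PySem.Str.isIn " " password
  let pool_size : Int := 0
  let pool_size := if lowercase then pool_size + 26 else pool_size
  let pool_size := if uppercase then pool_size + 26 else pool_size
  let pool_size := if digits then pool_size + 10 else pool_size
  let pool_size := if special_chars then pool_size + 32 else pool_size
  let pool_size := if whitespace then pool_size + 1 else pool_size
  pool_size

-- ===== PORT B =====
def pvPOOL : PySem.Dict Nat Int := ⟨[(1, 26), (2, 26), (4, 10), (8, 32), (16, 1)]⟩

def pvCharmask (c : Char) : Nat :=
  let m : Nat := 0
  let m := if PySem.Chars.islower c then m ||| 1 else m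
  let m := if PySem.Chars.isupper c then m ||| 2 else m
  let m := if PySem.Chars.isdigit c then m ||| 4 else m
  let m := if !PySem.Chars.isalnum c then m ||| 8 else m
  let m := if c == ' ' then m ||| 16 else m
  m

-- Python iterates 'for c in set(password)' with an OR-accumulator: the result is
-- iteration-order independent (lor is commutative/associative), ported over Set.ofList.
def password_poolsize_alt (password : String) : Int :=
  let mask := (PySem.Set.ofList password.toList).foldl (fun m c => m ||| pvCharmask c) 0
  ((PySem.Dict.items pvPOOL).filter (fun p => mask &&& p.1 != 0)).foldl (fun s p => s + p.2) 0

-- ===== PRECONDITION & SPEC =====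
def Spec_password_poolsize (password : String) (out : Int) : Prop := out = password_poolsize_alt password
instance (password : String) (out : Int) : Decidable (Spec_password_poolsize password out) := by unfold Spec_password_poolsize; infer_instance

-- ===== CLAIM (what is proved, stated in full; the proofs are below) =====
def Claim_equal_password_poolsize : Prop := ∀ (password : String), Dom_password_poolsize password → Spec_password_poolsize password (password_poolsize password)

-- ===== LEMMAS AND PROOFS =====

lemma testBit_foldl_lor (l : List Char) (m : Nat) (k : Nat) :
    ((l.foldl (fun m c => m ||| pvCharmask c) m)).testBit k
      = (m.testBit k || l.any fun c => (pvCharmask c).testBit k) := by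
  induction l generalizing m with
  | nil => simp
  | cons c l ih => simp [ih, Nat.testBit_or, Bool.or_assoc]

lemma charmask_bits (c : Char) :
    (pvCharmask c).testBit 0 = PySem.Chars.islower c ∧
    (pvCharmask c).testBit 1 = PySem.Chars.isupper c ∧
    (pvCharmask c).testBit 2 = PySem.Chars.isdigit c ∧
    (pvCharmask c).testBit 3 = (!PySem.Chars.isalnum c) ∧
    (pvCharmask c).testBit 4 = (c == ' ') := by
  unfold pvCharmask
  rcases h1 : PySem.Chars.islower c <;> rcases h2 : PySem.Chars.isupper c <;>
    rcases h3 : PySem.Chars.isdigit c <;> rcases h4 : PySem.Chars.isalnum c <;>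
    rcases h5 : c == ' ' <;> decide

lemma any_ofList (l : List Char) (p : Char → Bool) :
    ((PySem.Set.ofList l).any p) = l.any p := by
  rcases hb : l.any p with _ | _
  · rw [List.any_eq_false] at hb ⊢
    intro x hx
    exact hb x ((PySem.Set.mem_ofList l x).mp hx)
  · rw [List.any_eq_true] at hb ⊢
    obtain ⟨x, hx, hpx⟩ := hb
    exact ⟨x, (PySem.Set.mem_ofList l x).mpr hx, hpx⟩

lemma and_pow_ne_zero (n k : Nat) : (n &&& 2 ^ k != 0) = n.testBit k := by
  rw [Nat.and_two_pow]
  rcases n.testBit k <;> simp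

lemma and_bit0 (n : Nat) : (n &&& 1 != 0) = n.testBit 0 := by simpa using and_pow_ne_zero n 0
lemma and_bit1 (n : Nat) : (n &&& 2 != 0) = n.testBit 1 := by simpa using and_pow_ne_zero n 1
lemma and_bit2 (n : Nat) : (n &&& 4 != 0) = n.testBit 2 := by simpa using and_pow_ne_zero n 2
lemma and_bit3 (n : Nat) : (n &&& 8 != 0) = n.testBit 3 := by simpa using and_pow_ne_zero n 3
lemma and_bit4 (n : Nat) : (n &&& 16 != 0) = n.testBit 4 := by simpa using and_pow_ne_zero n 4

lemma isIn_space (password : String) :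
    PySem.Str.isIn " " password = password.toList.any (fun c => c == ' ') := by
  have hsp : (" " : String).toList = [' '] := rfl
  rcases hb : password.toList.any (fun c => c == ' ') with _ | _
  · refine Bool.eq_false_iff.mpr (fun h => ?_)
    have hinf := (PySem.Str.isIn_iff_infix " " password).mp h
    rw [hsp, List.singleton_infix_iff] at hinf
    rw [List.any_eq_false] at hb
    simpa using hb ' ' hinf
  · refine (PySem.Str.isIn_iff_infix " " password).mpr ?_
    rw [List.any_eq_true] at hb
    obtain ⟨x, hx, hx'⟩ := hb
    have hxe : x = ' ' := by simpa using hx'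
    subst hxe
    rw [hsp, List.singleton_infix_iff]
    exact hx

-- ===== VERDICT (by name: the statement is the Claim_ definition above) =====
theorem password_poolsize_spec : Claim_equal_password_poolsize := by
  intro password _
  unfold Spec_password_poolsize password_poolsize password_poolsize_alt pvPOOL
  rw [isIn_space]
  simp only [List.filter_cons, List.filter_nil]
  simp only [and_bit0, and_bit1, and_bit2, and_bit3, and_bit4,
    testBit_foldl_lor, Nat.zero_testBit, Bool.false_or]
  have hbits (k : Nat) (f : Char → Bool) (h : ∀ c, (pvCharmask c).testBit k = f c) :
      ((PySem.Set.ofList password.toList).any fun c => (pvCharmask c).testBit k)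
        = password.toList.any f := by
    simp only [h]; exact any_ofList _ f
  rw [hbits 0 _ (fun c => (charmask_bits c).1), hbits 1 _ (fun c => (charmask_bits c).2.1),
      hbits 2 _ (fun c => (charmask_bits c).2.2.1),
      hbits 3 _ (fun c => (charmask_bits c).2.2.2.1),
      hbits 4 _ (fun c => (charmask_bits c).2.2.2.2)]
  rcases password.toList.any (fun c => PySem.Chars.islower c) <;>
    rcases password.toList.any (fun c => PySem.Chars.isupper c) <;>
    rcases password.toList.any (fun c => PySem.Chars.isdigit c) <;>
    rcases password.toList.any (fun c => !PySem.Chars.isalnum c) <;>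
    rcases password.toList.any (fun c => c == ' ') <;> simp
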